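-- pv_equiv track=rewrite | github.com/ktawiah/CodePath-DSA | Unit-1/Session-1/Advanced_V1/tiggerfy.py | tiggerfy
-- ===== SOURCE A (Python) =====
-- def tiggerfy(words):
--     """
--     P: Return the word after strings "er", t, i, gg have been removed
--
--     eggplant -> eplan
--     trigger -> r
--
--     1. Create placeholder to store conditional strings
--     2. Convert word to list of characters
--     2. Loop through the word, keeping track of the index
--     3. If the char is e, check if next char is g -> Do same for gg
--     4. Else if char in set of strs, pop out char or pop out next two if gg or er
--     5. Return result
--     """
--
--     # Create a set of conditional strings
--     cond_set = {"t", "i", "gg", "er"}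
--
--     # Convert words into a list of chars
--     word_list = list(words)
--
--     # Iterate through word
--     index = 0
--
--     while index < len(word_list) - 1:
--         # Pop out char(s) if in set
--         if f"{word_list[index]}{word_list[index+1]}".lower() in cond_set:
--             word_list.pop(index)
--             word_list.pop(index)
--         elif word_list[index].lower() in cond_set:
--             word_list.pop(index)
--         else:
--             index += 1
--
--     # Return string of chars
--     return "".join(word_list)
-- ===== SOURCE B (Python) =====
-- def tiggerfy(words):
--     n = len(words)
--     out = []
--     j = 0
--     while j < n - 1:
--         pair = (words[j] + words[j + 1]).lower()
--         if pair == "gg" or pair == "er":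
--             j += 2
--         elif words[j].lower() in ("t", "i"):
--             j += 1
--         else:
--             out.append(words[j])
--             j += 1
--     return "".join(out) + words[j:]
-- ===== Notes on version B (the rewrite author's own statement) =====
-- stated objective: alternative
-- what changed: Replaced A's in-place list editing (repeated list.pop(index) calls that shift the suffix, re-checking the same index after each pop) by a single left-to-right streaming pass over the original string with one-character lookahead that appends kept characters to an output buffer; it avoids A's worst-case quadratic pop shifting but was not measurably faster on the benchmark inputs.
import Mathlib
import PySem

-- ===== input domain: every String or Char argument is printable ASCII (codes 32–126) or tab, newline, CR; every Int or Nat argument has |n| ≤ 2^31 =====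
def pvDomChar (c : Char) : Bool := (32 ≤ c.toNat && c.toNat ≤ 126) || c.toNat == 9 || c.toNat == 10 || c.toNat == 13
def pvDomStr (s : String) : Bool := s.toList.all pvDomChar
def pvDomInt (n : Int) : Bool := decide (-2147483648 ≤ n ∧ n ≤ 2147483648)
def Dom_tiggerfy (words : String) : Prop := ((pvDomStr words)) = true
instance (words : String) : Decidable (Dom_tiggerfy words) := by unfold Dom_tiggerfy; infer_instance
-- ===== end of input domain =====

-- B replaces A's in-place list.pop editing (which reshifts the suffix on every deletion,
-- re-checking the same index) by a single streaming pass over the original string with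
-- one-character lookahead; objective: alternative (same measured cost).

-- ===== PORT A =====
-- the set {"t","i","gg","er"} as a PySem set of strings (kept as List Char values)
def tiggerfyCondSet : PySem.Set (List Char) :=
  PySem.Set.ofList [['t'], ['i'], ['g','g'], ['e','r']]

-- A's while loop: word_list is mutated in place by pop(index); index advances only in the
-- else branch.  fuel is only a structural totality guard: 2*len+1 never runs out, since each
-- iteration decreases 2*word_list.length - index.
def tiggerfyLoop : Nat → List Char → Nat → List Char
  | 0, wl, _ => wl
  | fuel + 1, wl, index =>
    if index < wl.length - 1 then
      -- f"{wl[index]}{wl[index+1]}".lower() in cond_set  (both indices in range by the guard)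
      if tiggerfyCondSet.contains
          (PySem.Chars.lower [wl.getD index ' ', wl.getD (index + 1) ' ']) then
        tiggerfyLoop fuel ((wl.eraseIdx index).eraseIdx index) index
      else if tiggerfyCondSet.contains (PySem.Chars.lower [wl.getD index ' ']) then
        tiggerfyLoop fuel (wl.eraseIdx index) index
      else
        tiggerfyLoop fuel wl (index + 1)
    else wl

def tiggerfy (words : String) : String :=
  String.ofList (tiggerfyLoop (2 * words.toList.length + 1) words.toList 0)

-- ===== PORT B =====
-- B's while loop: index j over the ORIGINAL characters, accumulator out of kept characters.
-- fuel is only a structural totality guard: len+1 never runs out, since j increases each step.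
def tiggerfyAltLoop : Nat → List Char → Nat → List Char → List Char
  | 0, cs, j, out => out ++ cs.drop j
  | fuel + 1, cs, j, out =>
    if j < cs.length - 1 then
      let a := cs.getD j ' '
      let b := cs.getD (j + 1) ' '
      let pair := PySem.Chars.lower [a, b]
      if pair = ['g','g'] ∨ pair = ['e','r'] then
        tiggerfyAltLoop fuel cs (j + 2) out
      else if PySem.Chars.lowerChar a = 't' ∨ PySem.Chars.lowerChar a = 'i' then
        tiggerfyAltLoop fuel cs (j + 1) out
      else
        tiggerfyAltLoop fuel cs (j + 1) (out ++ [a])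
    else out ++ cs.drop j

def tiggerfy_alt (words : String) : String :=
  String.ofList (tiggerfyAltLoop (words.toList.length + 1) words.toList 0 [])

-- ===== PRECONDITION & SPEC =====
def Spec_tiggerfy (words : String) (out : String) : Prop := out = tiggerfy_alt words
instance (words : String) (out : String) : Decidable (Spec_tiggerfy words out) := by unfold Spec_tiggerfy; infer_instance

-- ===== CLAIM (what is proved, stated in full; the proofs are below) =====
def Claim_equal_tiggerfy : Prop := ∀ (words : String), Dom_tiggerfy words → Spec_tiggerfy words (tiggerfy words)

-- ===== LEMMAS AND PROOFS =====

-- common denominator: the result computed on the not-yet-examined suffix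
def tiggerfyCore : List Char → List Char
  | a :: b :: rs =>
    if PySem.Chars.lower [a, b] = ['g','g'] ∨ PySem.Chars.lower [a, b] = ['e','r'] then
      tiggerfyCore rs
    else if PySem.Chars.lowerChar a = 't' ∨ PySem.Chars.lowerChar a = 'i' then
      tiggerfyCore (b :: rs)
    else
      a :: tiggerfyCore (b :: rs)
  | rest => rest

lemma tiggerfyCond_pair (a b : Char) :
    tiggerfyCondSet.contains (PySem.Chars.lower [a, b]) =
      decide (PySem.Chars.lower [a, b] = ['g','g'] ∨ PySem.Chars.lower [a, b] = ['e','r']) := by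
  simp [tiggerfyCondSet, PySem.Chars.lower, PySem.Set.ofList, PySem.Set.contains,
    PySem.Set.add, List.contains_eq_mem]

lemma tiggerfyCond_single (a : Char) :
    tiggerfyCondSet.contains (PySem.Chars.lower [a]) =
      decide (PySem.Chars.lowerChar a = 't' ∨ PySem.Chars.lowerChar a = 'i') := by
  simp [tiggerfyCondSet, PySem.Chars.lower, PySem.Set.ofList, PySem.Set.contains,
    PySem.Set.add, List.contains_eq_mem]

lemma tiggerfyLoop_eq_core (fuel : Nat) (rest out : List Char)
    (hf : 2 * rest.length ≤ fuel) :
    tiggerfyLoop fuel (out ++ rest) out.length = out ++ tiggerfyCore rest := by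
  induction fuel generalizing rest out with
  | zero =>
    match rest with
    | [] => simp [tiggerfyLoop, tiggerfyCore]
    | _ :: _ => simp at hf
  | succ fuel ih =>
    match rest with
    | [] =>
      simp [tiggerfyLoop, tiggerfyCore]
    | [a] =>
      simp [tiggerfyLoop, tiggerfyCore]
    | a :: b :: rs =>
      have hguard : out.length < (out ++ a :: b :: rs).length - 1 := by simp
      have hga : (out ++ a :: b :: rs).getD out.length ' ' = a := by
        simp [List.getD]
      have hgb : (out ++ a :: b :: rs).getD (out.length + 1) ' ' = b := by
        rw [show out ++ a :: b :: rs = (out ++ [a]) ++ (b :: rs) by simp,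
          show out.length + 1 = (out ++ [a]).length by simp]
        simp [List.getD]
      rw [tiggerfyLoop, if_pos hguard, hga, hgb, tiggerfyCond_pair, tiggerfyCond_single]
      simp only [List.length_cons] at hf
      by_cases hp : PySem.Chars.lower [a, b] = ['g','g'] ∨ PySem.Chars.lower [a, b] = ['e','r']
      · rw [if_pos (by simpa using hp)]
        have he1 : (out ++ a :: b :: rs).eraseIdx out.length = out ++ b :: rs := by
          rw [List.eraseIdx_append_of_length_le (le_refl _)]; simp
        have he2 : (out ++ b :: rs).eraseIdx out.length = out ++ rs := by
          rw [List.eraseIdx_append_of_length_le (le_refl _)]; simp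
        rw [he1, he2, ih rs out (by omega)]
        simp [tiggerfyCore, hp]
      · rw [if_neg (by simpa using hp)]
        by_cases hs : PySem.Chars.lowerChar a = 't' ∨ PySem.Chars.lowerChar a = 'i'
        · rw [if_pos (by simpa using hs)]
          have he1 : (out ++ a :: b :: rs).eraseIdx out.length = out ++ b :: rs := by
            rw [List.eraseIdx_append_of_length_le (le_refl _)]; simp
          rw [he1, ih (b :: rs) out (by simp; omega)]
          simp [tiggerfyCore, hp, hs]
        · rw [if_neg (by simpa using hs)]
          rw [show out ++ a :: b :: rs = (out ++ [a]) ++ (b :: rs) by simp,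
            show out.length + 1 = (out ++ [a]).length by simp]
          rw [ih (b :: rs) (out ++ [a]) (by simp; omega)]
          simp [tiggerfyCore, hp, hs]

lemma tiggerfyAltLoop_eq_core (fuel : Nat) (cs : List Char) (j : Nat) (out : List Char)
    (hf : cs.length - j ≤ fuel) :
    tiggerfyAltLoop fuel cs j out = out ++ tiggerfyCore (cs.drop j) := by
  induction fuel generalizing j out with
  | zero =>
    have : cs.drop j = [] := by
      apply List.drop_eq_nil_of_le; omega
    rw [tiggerfyAltLoop, this]
    simp [tiggerfyCore]
  | succ fuel ih =>
    rw [tiggerfyAltLoop]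
    by_cases hg : j < cs.length - 1
    · rw [if_pos hg]
      have hj1 : j + 1 < cs.length := by omega
      have hj : j < cs.length := by omega
      have hdrop : cs.drop j = cs[j] :: cs[j+1] :: cs.drop (j + 2) := by
        rw [List.drop_eq_getElem_cons hj, List.drop_eq_getElem_cons hj1]
      have hga : cs.getD j ' ' = cs[j] := List.getD_eq_getElem cs ' ' hj
      have hgb : cs.getD (j + 1) ' ' = cs[j+1] := List.getD_eq_getElem cs ' ' hj1
      simp only [hga, hgb]
      by_cases hp : PySem.Chars.lower [cs[j], cs[j+1]] = ['g','g'] ∨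
          PySem.Chars.lower [cs[j], cs[j+1]] = ['e','r']
      · rw [if_pos hp, ih (j + 2) out (by omega), hdrop]
        simp [tiggerfyCore, hp]
      · rw [if_neg hp]
        have hdrop1 : cs.drop (j + 1) = cs[j+1] :: cs.drop (j + 2) := by
          rw [List.drop_eq_getElem_cons hj1]
        by_cases hs : PySem.Chars.lowerChar cs[j] = 't' ∨ PySem.Chars.lowerChar cs[j] = 'i'
        · rw [if_pos hs, ih (j + 1) out (by omega), hdrop, hdrop1]
          simp [tiggerfyCore, hp, hs]
        · rw [if_neg hs, ih (j + 1) (out ++ [cs[j]]) (by omega), hdrop, hdrop1]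
          simp [tiggerfyCore, hp, hs]
    · rw [if_neg hg]
      match hrest : cs.drop j with
      | [] => simp [tiggerfyCore]
      | [a] => simp [tiggerfyCore]
      | a :: b :: rs =>
        exfalso
        have := List.length_drop (l := cs) (i := j)
        rw [hrest] at this
        simp at this
        omega

-- ===== VERDICT (by name: the statement is the Claim_ definition above) =====
theorem tiggerfy_spec : Claim_equal_tiggerfy := by
  intro words _
  unfold Spec_tiggerfy tiggerfy tiggerfy_alt
  rw [tiggerfyAltLoop_eq_core _ _ _ _ (by omega)]
  have := tiggerfyLoop_eq_core (2 * words.toList.length + 1) words.toList [] (by omega)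
  simp at this ⊢
  rw [this]
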